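-- pv_equiv track=rewrite | github.com/iamredencio/technical-documentation-suite | src/tech_doc_suite/agents/doc_writer.py | _generate_dependencies_section
-- ===== SOURCE A (Python) =====
-- from typing import Dict, Any, List, Optional
--
-- def _generate_dependencies_section(dependencies: List[Dict[str, Any]]) -> str:
--     """Generate dependencies section"""
--     if not dependencies:
--         return ""
--
--     section = "## Dependencies\n\n"
--
--     runtime_deps = [d for d in dependencies if d.get("type") == "runtime"]
--     dev_deps = [d for d in dependencies if d.get("type") == "development"]
--
--     if runtime_deps:
--         section += "### Runtime Dependencies\n\n"
--         for dep in runtime_deps: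
--             name = dep.get("name")
--             version = dep.get("version", "latest")
--             section += f"- **{name}** ({version})\n"
--         section += "\n"
--
--     if dev_deps:
--         section += "### Development Dependencies\n\n"
--         for dep in dev_deps:
--             name = dep.get("name")
--             version = dep.get("version", "latest")
--             section += f"- **{name}** ({version})\n"
--         section += "\n"
--
--     return section
-- ===== SOURCE B (Python) =====
-- def _generate_dependencies_section(dependencies):
--     """Generate dependencies section (single pass, two string accumulators)."""
--     if not dependencies:
--         return ""
--     runtime_lines = ""
--     dev_lines = ""
--     for dep in dependencies:
--         t = dep.get("type")
--         if t == "runtime":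
--             runtime_lines += f"- **{dep.get('name')}** ({dep.get('version', 'latest')})\n"
--         elif t == "development":
--             dev_lines += f"- **{dep.get('name')}** ({dep.get('version', 'latest')})\n"
--     out = "## Dependencies\n\n"
--     if runtime_lines:
--         out += "### Runtime Dependencies\n\n" + runtime_lines + "\n"
--     if dev_lines:
--         out += "### Development Dependencies\n\n" + dev_lines + "\n"
--     return out
-- ===== Notes on version B (the rewrite author's own statement) =====
-- stated objective: alternative
-- what changed: Replaces A's two filter passes plus per-group emit loops by a single pass over dependencies that accumulates the runtime and development bullet-line strings directly, then assembles the output from those two accumulators (guarded by string non-emptiness instead of list non-emptiness).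
import Mathlib
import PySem

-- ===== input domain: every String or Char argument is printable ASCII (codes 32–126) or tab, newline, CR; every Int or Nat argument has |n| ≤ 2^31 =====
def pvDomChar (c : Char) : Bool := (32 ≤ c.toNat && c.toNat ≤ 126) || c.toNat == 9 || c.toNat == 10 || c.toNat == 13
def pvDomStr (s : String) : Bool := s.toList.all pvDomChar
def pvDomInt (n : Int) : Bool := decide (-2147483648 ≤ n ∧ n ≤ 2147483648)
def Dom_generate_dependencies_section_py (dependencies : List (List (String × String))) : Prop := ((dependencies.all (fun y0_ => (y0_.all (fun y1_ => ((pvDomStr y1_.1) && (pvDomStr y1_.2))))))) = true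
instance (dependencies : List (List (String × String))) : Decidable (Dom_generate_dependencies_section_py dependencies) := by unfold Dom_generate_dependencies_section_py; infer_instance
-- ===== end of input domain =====

-- B replaces A's two filter passes + per-group emit loops by ONE pass over dependencies that
-- accumulates the two bullet-line strings directly, then assembles the output (objective: alternative).


-- shared helpers: 'dep.get(k)' on an input dict, and the f-string bullet line (identical in A and B)
def pvDepGet (dep : List (String × String)) (k : String) : Option String :=
  (PySem.Dict.ofList dep).get? k

def pvBullet (dep : List (String × String)) : String :=
  "- **" ++ (match pvDepGet dep "name" with | some s => s | none => "None")
    ++ "** (" ++ ((pvDepGet dep "version").getD "latest") ++ ")\n"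

-- ===== PORT A =====
def generate_dependencies_section_py (dependencies : List (List (String × String))) : String :=
  if dependencies = [] then "" else
  let section0 := "## Dependencies\n\n"
  let runtime_deps := dependencies.filter (fun d => pvDepGet d "type" == some "runtime")
  let dev_deps := dependencies.filter (fun d => pvDepGet d "type" == some "development")
  let section1 :=
    if runtime_deps = [] then section0
    else (runtime_deps.foldl (fun s dep => s ++ pvBullet dep)
            (section0 ++ "### Runtime Dependencies\n\n")) ++ "\n"
  let section2 :=
    if dev_deps = [] then section1
    else (dev_deps.foldl (fun s dep => s ++ pvBullet dep)
            (section1 ++ "### Development Dependencies\n\n")) ++ "\n"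
  section2

-- ===== PORT B =====
-- one pass: (runtime_lines, dev_lines) string accumulators, then conditional assembly
def generate_dependencies_section_py_alt (dependencies : List (List (String × String))) : String :=
  if dependencies = [] then "" else
  let acc : String × String :=
    dependencies.foldl (fun acc dep =>
      let t := pvDepGet dep "type"
      if t == some "runtime" then (acc.1 ++ pvBullet dep, acc.2)
      else if t == some "development" then (acc.1, acc.2 ++ pvBullet dep)
      else acc) ("", "")
  let out0 := "## Dependencies\n\n"
  let out1 := if acc.1 ≠ "" then out0 ++ "### Runtime Dependencies\n\n" ++ acc.1 ++ "\n" else out0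
  let out2 := if acc.2 ≠ "" then out1 ++ "### Development Dependencies\n\n" ++ acc.2 ++ "\n" else out1
  out2

-- ===== PRECONDITION & SPEC =====
def Spec_generate_dependencies_section_py (dependencies : List (List (String × String))) (out : String) : Prop := out = generate_dependencies_section_py_alt dependencies
instance (dependencies : List (List (String × String))) (out : String) : Decidable (Spec_generate_dependencies_section_py dependencies out) := by unfold Spec_generate_dependencies_section_py; infer_instance

-- ===== CLAIM (what is proved, stated in full; the proofs are below) =====
def Claim_equal_generate_dependencies_section_py : Prop := ∀ (dependencies : List (List (String × String))), Dom_generate_dependencies_section_py dependencies → Spec_generate_dependencies_section_py dependencies (generate_dependencies_section_py dependencies)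

-- ===== LEMMAS AND PROOFS =====

-- the concatenation of the bullet lines of a list of deps
def pvBullets : List (List (String × String)) → String
  | [] => ""
  | d :: rest => pvBullet d ++ pvBullets rest

lemma foldl_bullet (l : List (List (String × String))) (s : String) :
    l.foldl (fun s dep => s ++ pvBullet dep) s = s ++ pvBullets l := by
  induction l generalizing s with
  | nil => simp [pvBullets]
  | cons d rest ih => simp [pvBullets, ih, String.append_assoc]

lemma pvBullet_ne_empty (dep : List (String × String)) : pvBullet dep ≠ "" := by
  intro h
  have := congrArg String.length h
  simp [pvBullet, String.length_append] at this

lemma pvBullets_eq_empty_iff (l : List (List (String × String))) :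
    pvBullets l = "" ↔ l = [] := by
  cases l with
  | nil => simp [pvBullets]
  | cons d rest =>
    simp only [pvBullets]
    constructor
    · intro h
      have := congrArg String.length h
      simp [String.length_append, String.length_eq_zero_iff] at this
      exact absurd this.1 (pvBullet_ne_empty d)
    · intro h; cases h

-- B's single pass computes exactly the bullet strings of A's two filtered lists
lemma fold_acc (l : List (List (String × String))) (r d : String) :
    l.foldl (fun acc dep =>
      let t := pvDepGet dep "type"
      if t == some "runtime" then (acc.1 ++ pvBullet dep, acc.2)
      else if t == some "development" then (acc.1, acc.2 ++ pvBullet dep)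
      else acc) (r, d)
    = (r ++ pvBullets (l.filter (fun x => pvDepGet x "type" == some "runtime")),
       d ++ pvBullets (l.filter (fun x => pvDepGet x "type" == some "development"))) := by
  induction l generalizing r d with
  | nil => simp [pvBullets]
  | cons x rest ih =>
    simp only [List.foldl_cons, List.filter_cons]
    by_cases h1 : pvDepGet x "type" = some "runtime"
    · rw [if_pos (by simp [h1]), if_pos (by simp [h1]), if_neg (by simp [h1]), ih]
      simp [pvBullets, String.append_assoc]
    · by_cases h2 : pvDepGet x "type" = some "development"
      · rw [if_neg (by simp [h1]), if_pos (by simp [h2]), if_neg (by simp [h2]),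
            if_pos (by simp [h2]), ih]
        simp [pvBullets, String.append_assoc]
      · rw [if_neg (by simp [h1]), if_neg (by simp [h2]), if_neg (by simp [h1]),
            if_neg (by simp [h2]), ih]

-- ===== VERDICT (by name: the statement is the Claim_ definition above) =====
theorem generate_dependencies_section_py_spec : Claim_equal_generate_dependencies_section_py := by
  intro dependencies _
  unfold Spec_generate_dependencies_section_py generate_dependencies_section_py generate_dependencies_section_py_alt
  by_cases hnil : dependencies = []
  · simp [hnil]
  · rw [if_neg hnil, if_neg hnil]
    simp only [fold_acc]
    have hr := pvBullets_eq_empty_iff (dependencies.filter (fun x => pvDepGet x "type" == some "runtime"))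
    have hd := pvBullets_eq_empty_iff (dependencies.filter (fun x => pvDepGet x "type" == some "development"))
    simp only [foldl_bullet, String.empty_append, ne_eq, hr, hd]
    split_ifs with h1 h2 h2 <;> simp_all [String.append_assoc]
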